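-- pv_equiv track=rewrite | github.com/abdullahOzdemirr/steganografi | veri_yazma_arayüzlü.py | karakterden_ikili
-- ===== SOURCE A (Python) =====
-- def karakterden_ikili(karakter):#karakterin ikili halinin tersini verir.Bu veriyi okurken işi kolaylaştırıyor
--     asci_kod=ord(karakter)#karakterin ascii kodunu alma
--     binary=""
--     sayac=0
--     while sayac!=8:#Her karakter için 8 bit ayırma
--         binary+=str(asci_kod%2)
--         asci_kod=int(asci_kod/2)
--         sayac+=1
--     return binary
-- ===== SOURCE B (Python) =====
-- def karakterden_ikili(karakter):
--     # closed form: 8-bit MSB-first binary of the character code, reversed to LSB-first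
--     return format(ord(karakter), '08b')[::-1]
-- ===== Notes on version B (the rewrite author's own statement) =====
-- stated objective: idiomatic
-- what changed: The bit-by-bit while loop with a running string accumulator is replaced by a closed-form conversion: a single zero-padded eight-bit binary format call produces the MSB-first string, then a slice reverses it to the loop's LSB-first order.
import Mathlib
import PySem

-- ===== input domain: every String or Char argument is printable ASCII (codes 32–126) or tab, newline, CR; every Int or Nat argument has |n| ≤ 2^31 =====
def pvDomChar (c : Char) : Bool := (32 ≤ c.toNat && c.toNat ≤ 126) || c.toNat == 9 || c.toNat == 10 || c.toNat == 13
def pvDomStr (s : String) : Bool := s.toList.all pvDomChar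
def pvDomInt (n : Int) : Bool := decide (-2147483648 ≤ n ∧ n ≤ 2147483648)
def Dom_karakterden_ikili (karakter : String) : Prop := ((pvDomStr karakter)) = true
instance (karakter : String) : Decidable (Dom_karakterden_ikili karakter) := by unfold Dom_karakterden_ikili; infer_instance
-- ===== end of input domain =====

-- B replaces A's bit-by-bit accumulation loop with a closed-form 8-bit format-then-reverse (idiomatic).


-- ===== PORT A =====
-- the while loop: 8 iterations, appending str(asci_kod % 2) and halving asci_kod
-- (asci_kod = ord(karakter) is nonnegative, so int(asci_kod/2) is Nat division)
def pvALoop (asci0 : Nat) : String :=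
  ((List.range 8).foldl
      (fun (st : Nat × String) _ => (st.1 / 2, st.2 ++ toString (st.1 % 2)))
      (asci0, "")).2

def karakterden_ikili (karakter : String) : String :=
  -- ord(karakter); Pre_ guarantees a single character, headD is a totality guard only
  pvALoop (karakter.toList.headD (Char.ofNat 0)).toNat

-- ===== PORT B =====
-- format(n, '08b'): the 8 binary digits of n, MSB first (exact for n < 256, which
-- Dom_ + Pre_ guarantee since ord ≤ 126); [::-1] is List.reverse
def pvBStr (n : Nat) : String :=
  String.mk (((List.range 8).map (fun i => if n / 2 ^ (7 - i) % 2 = 1 then '1' else '0')).reverse)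

def karakterden_ikili_alt (karakter : String) : String :=
  pvBStr (karakter.toList.headD (Char.ofNat 0)).toNat

-- ===== PRECONDITION & SPEC =====
-- Pre_ excludes exactly the strings whose length is not 1: ord(karakter) raises TypeError there (in both A and B).
def Pre_karakterden_ikili (karakter : String) : Prop := karakter.toList.length = 1
instance (karakter : String) : Decidable (Pre_karakterden_ikili karakter) := by unfold Pre_karakterden_ikili; infer_instance
def pvWitness_karakterden_ikili : String := "A"

def Spec_karakterden_ikili (karakter : String) (out : String) : Prop := out = karakterden_ikili_alt karakter
instance (karakter : String) (out : String) : Decidable (Spec_karakterden_ikili karakter out) := by unfold Spec_karakterden_ikili; infer_instance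

-- ===== CLAIM (what is proved, stated in full; the proofs are below) =====
def Claim_equal_karakterden_ikili : Prop := ∀ (karakter : String), Dom_karakterden_ikili karakter → Pre_karakterden_ikili karakter → Spec_karakterden_ikili karakter (karakterden_ikili karakter)

-- ===== LEMMAS AND PROOFS =====
set_option maxRecDepth 4000 in
theorem pvLoop_eq_fmt : ∀ n < 256, pvALoop n = pvBStr n := by decide

-- ===== VERDICT (by name: the statement is the Claim_ definition above) =====
theorem karakterden_ikili_spec : Claim_equal_karakterden_ikili := by
  intro k hdom _hpre
  unfold Spec_karakterden_ikili karakterden_ikili karakterden_ikili_alt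
  apply pvLoop_eq_fmt
  cases hl : k.toList with
  | nil => simp
  | cons c t =>
    have : pvDomChar c = true := by
      have := hdom
      unfold Dom_karakterden_ikili pvDomStr at this
      rw [hl] at this
      exact (List.all_eq_true.mp this) c (List.mem_cons_self ..)
    simp only [List.headD_cons]
    unfold pvDomChar at this
    simp only [Bool.or_eq_true, Bool.and_eq_true, decide_eq_true_eq, beq_iff_eq] at this
    omega
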